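-- pv_equiv track=rewrite | github.com/9001/softchat | softchat/ass.py | assan
-- ===== SOURCE A (Python) =====
-- def assan(x):
--     # there is no standardization on escaping ["{", "}", "\\"]:
--     #   the commented one is for aegisub,
--     #   the enabled one is for mpv
--
--     # aegsiub:
--     # return x.replace("{", "<").replace("}", ">").replace('\\', '\\{}')
--
--     # mpv:
--     ret = ""
--     for c, nc in zip(x, x[1:] + "\n"):
--         if c == "{":
--             ret += "\\{"
--         elif c == "}":
--             ret += "\\}"
--         elif c == "\\" and nc in ["N", "n", "h"]:
--             ret += "\\\\"
--         else:
--             ret += c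
--
--     # mpv:
--     #   there is no way to encode a literal \ before a markup {
--     #   so the lines must end with a whitespace
--     return ret + " "
-- ===== SOURCE B (Python) =====
-- import re
--
-- def assan(x):
--     # single regex substitution: escape { } always, and a backslash only when
--     # followed (non-consumingly) by N, n or h
--     return re.sub(r'\\(?=[Nnh])|[{}]', lambda m: '\\' + m.group(0), x) + " "
-- ===== Notes on version B (the rewrite author's own statement) =====
-- stated objective: idiomatic
-- what changed: Replaces the explicit per-character branch ladder over pairs of each character and its successor with a single regex substitution using a non-consuming lookahead (escape braces always, a backslash only before N/n/h) whose replacement prefixes a backslash.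
import Mathlib
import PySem

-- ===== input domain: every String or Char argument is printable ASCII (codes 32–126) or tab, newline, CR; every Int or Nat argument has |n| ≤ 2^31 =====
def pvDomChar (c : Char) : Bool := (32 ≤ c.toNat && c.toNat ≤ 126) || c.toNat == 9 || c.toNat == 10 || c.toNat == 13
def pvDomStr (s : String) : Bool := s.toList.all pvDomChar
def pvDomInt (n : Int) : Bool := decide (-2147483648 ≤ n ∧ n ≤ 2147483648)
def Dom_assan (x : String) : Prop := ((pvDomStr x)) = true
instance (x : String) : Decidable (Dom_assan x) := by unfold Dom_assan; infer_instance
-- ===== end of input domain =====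

-- B replaces A's explicit branch ladder over (char, next-char) pairs by a single
-- regex-style substitution with a non-consuming lookahead (idiomatic; same cost).

-- ===== PORT A =====
-- A: loop over zip(x, x[1:] + "\n"), appending to an accumulator string, then + " "
def assanStep (ret : List Char) (p : Char × Char) : List Char :=
  if p.1 = '{' then ret ++ ['\\', '{']
  else if p.1 = '}' then ret ++ ['\\', '}']
  else if p.1 = '\\' ∧ (p.2 = 'N' ∨ p.2 = 'n' ∨ p.2 = 'h') then ret ++ ['\\', '\\']
  else ret ++ [p.1]

def assan (x : String) : String :=
  let ret := (List.zip x.toList (x.toList.drop 1 ++ ['\n'])).foldl assanStep []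
  String.ofList (ret ++ [' '])

-- ===== PORT B =====
-- B: one pass applying the substitution r'\\(?=[Nnh])|[{}]' → '\' + match,
-- the lookahead being non-consuming (the char after '\' is re-examined).
def assanSub : List Char → List Char
  | [] => []
  | c :: rest =>
    if c == '{' || c == '}' then '\\' :: c :: assanSub rest
    else if c = '\\' && (match rest with
                        | r :: _ => r == 'N' || r == 'n' || r == 'h'
                        | [] => false) then '\\' :: c :: assanSub rest
    else c :: assanSub rest

def assan_alt (x : String) : String := String.ofList (assanSub x.toList ++ [' '])

-- ===== PRECONDITION & SPEC =====
def Spec_assan (x : String) (out : String) : Prop := out = assan_alt x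
instance (x : String) (out : String) : Decidable (Spec_assan x out) := by unfold Spec_assan; infer_instance

-- ===== CLAIM (what is proved, stated in full; the proofs are below) =====
def Claim_equal_assan : Prop := ∀ (x : String), Dom_assan x → Spec_assan x (assan x)

-- ===== LEMMAS AND PROOFS =====

theorem assan_fold_eq_sub (l acc : List Char) :
    (List.zip l (l.drop 1 ++ ['\n'])).foldl assanStep acc = acc ++ assanSub l := by
  induction l generalizing acc with
  | nil => simp [assanSub]
  | cons c rest ih =>
    cases rest with
    | nil =>
      simp only [List.drop, List.nil_append, List.zip_cons_cons, List.zip_nil_left,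
        List.foldl_cons, List.foldl_nil, assanSub, assanStep]
      split_ifs with h1 h2 h3 <;> simp_all
    | cons r rs =>
      have : ((c :: r :: rs).drop 1 ++ ['\n']) = r :: ((r :: rs).drop 1 ++ ['\n']) := by simp
      rw [this, List.zip_cons_cons, List.foldl_cons, ih]
      simp only [assanStep, assanSub]
      split_ifs with h1 h2 h3 <;> simp_all

-- ===== VERDICT (by name: the statement is the Claim_ definition above) =====
theorem assan_spec : Claim_equal_assan := by
  intro x _
  show assan x = assan_alt x
  unfold assan assan_alt
  rw [assan_fold_eq_sub]
  simp
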